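-- pv_equiv track=rewrite | github.com/vandmo/advent-of-code | 2020/21/parts.py | pair_ingredient_with_allergen
-- ===== SOURCE A (Python) =====
-- def pair_ingredient_with_allergen(per_allergen, remaining: set[str]):
--     if not per_allergen:
--         assert not remaining
--         return tuple()
--     (first_allergen, first_ingredients), *rest = per_allergen
--     for remaining_ingredient in first_ingredients:
--         if remaining_ingredient not in remaining:
--             continue
--         remaining_pairs = pair_ingredient_with_allergen(
--             rest, remaining - set([remaining_ingredient])
--         )
--         if remaining_pairs is not None:
--             return ((first_allergen, remaining_ingredient),) + remaining_pairs
--     return None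
-- ===== SOURCE B (Python) =====
-- def pair_ingredient_with_allergen(per_allergen, remaining: set[str]):
--     # Iterative backtracking with an explicit stack instead of recursion.
--     # Each frame: (remaining set, partial assignment, iterator over the
--     # not-yet-tried ingredients of the next allergen).
--     per_allergen = list(per_allergen)
--     n = len(per_allergen)
--     if n == 0:
--         assert not remaining
--         return tuple()
--     stack = [(remaining, (), iter(per_allergen[0][1]))]
--     while stack:
--         rem, acc, candidates = stack[-1]
--         found = None
--         for x in candidates:
--             if x in rem:
--                 found = x
--                 break
--         if found is None:
--             stack.pop()  # frame exhausted: backtrack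
--             continue
--         child_rem = rem - {found}
--         child_acc = acc + ((per_allergen[len(acc)][0], found),)
--         if len(child_acc) == n:
--             assert not child_rem
--             return child_acc
--         stack.append((child_rem, child_acc, iter(per_allergen[len(child_acc)][1])))
--     return None
-- ===== Notes on version B (the rewrite author's own statement) =====
-- stated objective: alternative
-- what changed: A's recursive DFS over per_allergen is replaced by iterative backtracking with an explicit stack of (remaining-set, partial-assignment, resume-position) frames; same first-found assignment and same search order.
import Mathlib
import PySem

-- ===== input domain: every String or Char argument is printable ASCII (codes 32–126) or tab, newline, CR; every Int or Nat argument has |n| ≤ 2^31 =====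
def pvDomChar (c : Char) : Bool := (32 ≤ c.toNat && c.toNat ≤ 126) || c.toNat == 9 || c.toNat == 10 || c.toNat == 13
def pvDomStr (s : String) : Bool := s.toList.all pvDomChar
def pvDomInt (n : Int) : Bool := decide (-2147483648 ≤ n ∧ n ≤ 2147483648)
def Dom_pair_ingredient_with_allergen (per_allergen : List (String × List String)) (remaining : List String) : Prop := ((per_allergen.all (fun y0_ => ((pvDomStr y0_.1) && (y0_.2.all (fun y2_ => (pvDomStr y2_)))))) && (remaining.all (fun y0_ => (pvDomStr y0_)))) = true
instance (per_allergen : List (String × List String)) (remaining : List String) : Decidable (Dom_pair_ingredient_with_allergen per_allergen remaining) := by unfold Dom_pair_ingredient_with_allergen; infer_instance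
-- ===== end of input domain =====

-- B replaces A's recursive DFS by iterative backtracking over an explicit stack of
-- (remaining-set, partial-assignment, untried-candidates) frames; same first-found assignment, same cost.

-- ===== PORT A =====
-- 'assert not remaining' failing (AssertionError) is modeled as a failure result; Pre_ excludes exactly those inputs.
def pair_ingredient_with_allergen (per_allergen : List (String × List String)) (remaining : List String) : Option (List (String × String)) :=
  match per_allergen with
  | [] => if remaining.isEmpty then some [] else none
  | (first_allergen, first_ingredients) :: rest =>
    first_ingredients.foldr (fun x acc =>
      if PySem.Set.contains remaining x then
        match pair_ingredient_with_allergen rest (PySem.Set.diff remaining (PySem.Set.ofList [x])) with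
        | some ps => some ((first_allergen, x) :: ps)
        | none => acc
      else acc) none

-- ===== PORT B =====
-- termination bookkeeping for the backtracking loop: size of the search tree of a suffix of per_allergen
def pvTsize : List (String × List String) → Nat
  | [] => 1
  | (_, ings) :: rest => 1 + ings.length * pvTsize rest

def pvFrameW (pa : List (String × List String)) (f : List String × List (String × String) × List String) : Nat :=
  f.2.2.length * pvTsize (pa.drop (f.2.1.length + 1))

def pvMeasure (pa : List (String × List String)) (stack : List (List String × List (String × String) × List String)) : Nat :=
  2 * (stack.map (pvFrameW pa)).sum + stack.length

theorem pvTsize_pos (l : List (String × List String)) : 1 ≤ pvTsize l := by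
  cases l with
  | nil => simp [pvTsize]
  | cons a l => simp [pvTsize]

theorem pvTsize_getD (pa : List (String × List String)) (j : Nat) :
    ((pa.getD j ("", [])).2.length) * pvTsize (pa.drop (j + 1)) = pvTsize (pa.drop j) - 1 := by
  induction pa generalizing j with
  | nil => simp [pvTsize]
  | cons a pa ih =>
    cases j with
    | zero => simp [pvTsize]
    | succ j => simpa using ih j

theorem pvMeasure_tail (pa : List (String × List String)) (f : List String × List (String × String) × List String)
    (s : List (List String × List (String × String) × List String)) :
    pvMeasure pa s < pvMeasure pa (f :: s) := by
  simp [pvMeasure]; omega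

theorem pvMeasure_advance (pa : List (String × List String)) (rem : List String)
    (acc : List (String × String)) (x : String) (cs : List String)
    (s : List (List String × List (String × String) × List String)) :
    pvMeasure pa ((rem, acc, cs) :: s) < pvMeasure pa ((rem, acc, x :: cs) :: s) := by
  have hT := pvTsize_pos (pa.drop (acc.length + 1))
  simp only [pvMeasure, List.map_cons, List.sum_cons, List.length_cons, pvFrameW]
  have h1 : (cs.length + 1) * pvTsize (pa.drop (acc.length + 1))
      = cs.length * pvTsize (pa.drop (acc.length + 1)) + pvTsize (pa.drop (acc.length + 1)) := by ring
  have h2 : (x :: cs).length * pvTsize (pa.drop (acc.length + 1))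
      = (cs.length + 1) * pvTsize (pa.drop (acc.length + 1)) := by rw [List.length_cons]
  omega

theorem pvMeasure_push (pa : List (String × List String)) (rem d : List String)
    (acc : List (String × String)) (y : String × String) (x : String) (cs : List String)
    (s : List (List String × List (String × String) × List String)) :
    pvMeasure pa ((d, acc ++ [y], (pa.getD (acc.length + 1) ("", [])).2) :: (rem, acc, cs) :: s)
      < pvMeasure pa ((rem, acc, x :: cs) :: s) := by
  have hT := pvTsize_pos (pa.drop (acc.length + 1))
  have hW := pvTsize_getD pa (acc.length + 1)
  simp only [pvMeasure, List.map_cons, List.sum_cons, List.length_cons, pvFrameW,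
    List.length_append, List.length_cons, List.length_nil, Nat.zero_add]
  have h1 : (cs.length + 1) * pvTsize (pa.drop (acc.length + 1))
      = cs.length * pvTsize (pa.drop (acc.length + 1)) + pvTsize (pa.drop (acc.length + 1)) := by ring
  have h2 : (x :: cs).length * pvTsize (pa.drop (acc.length + 1))
      = (cs.length + 1) * pvTsize (pa.drop (acc.length + 1)) := by rw [List.length_cons]
  omega

-- the explicit-stack backtracking loop of B; each frame carries the candidates its iterator has not yet produced
def pvLoop (pa : List (String × List String)) (n : Nat)
    (stack : List (List String × List (String × String) × List String)) : Option (List (String × String)) :=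
  match stack with
  | [] => none
  | (rem, acc, cands) :: s =>
    match cands with
    | [] => pvLoop pa n s
    | x :: cs =>
      if PySem.Set.contains rem x then
        if acc.length + 1 = n then
          -- 'assert not child_rem': AssertionError modeled as a failure (these inputs are excluded by Pre_)
          if (PySem.Set.diff rem (PySem.Set.ofList [x])).isEmpty then
            some (acc ++ [((pa.getD acc.length ("", [])).1, x)])
          else pvLoop pa n ((rem, acc, cs) :: s)
        else
          pvLoop pa n ((PySem.Set.diff rem (PySem.Set.ofList [x]),
                        acc ++ [((pa.getD acc.length ("", [])).1, x)],
                        (pa.getD (acc.length + 1) ("", [])).2) :: (rem, acc, cs) :: s)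
      else pvLoop pa n ((rem, acc, cs) :: s)
termination_by pvMeasure pa stack
decreasing_by
  · exact pvMeasure_tail pa _ s
  · exact pvMeasure_advance pa rem acc x cs s
  · exact pvMeasure_push pa rem _ acc _ x cs s
  · exact pvMeasure_advance pa rem acc x cs s

def pair_ingredient_with_allergen_alt (per_allergen : List (String × List String)) (remaining : List String) : Option (List (String × String)) :=
  match per_allergen with
  | [] => if remaining.isEmpty then some [] else none  -- 'assert not remaining' modeled as a failure (excluded by Pre_)
  | _ => pvLoop per_allergen per_allergen.length [(remaining, [], (per_allergen.getD 0 ("", [])).2)]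

-- ===== PRECONDITION & SPEC =====
-- whether a complete assignment (distinct in-remaining ingredient for each allergen, in order) exists
def pvHasChain : List (String × List String) → List String → Bool
  | [], _ => true
  | (_, ings) :: rest, rem =>
    ings.any (fun x => PySem.Set.contains rem x && pvHasChain rest (PySem.Set.diff rem (PySem.Set.ofList [x])))

-- Pre_ excludes exactly the inputs on which A raises AssertionError: strictly more distinct remaining
-- ingredients than allergens while a complete allergen-to-ingredient matching exists.
def Pre_pair_ingredient_with_allergen (per_allergen : List (String × List String)) (remaining : List String) : Prop :=
  (PySem.List.dedup remaining).length ≤ per_allergen.length ∨ pvHasChain per_allergen remaining = false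
instance (per_allergen : List (String × List String)) (remaining : List String) : Decidable (Pre_pair_ingredient_with_allergen per_allergen remaining) := by unfold Pre_pair_ingredient_with_allergen; infer_instance

def pvWitness_pair_ingredient_with_allergen : (List (String × List String)) × List String :=
  ([("dairy", ["a", "b"]), ("fish", ["b"])], ["a", "b"])

def Spec_pair_ingredient_with_allergen (per_allergen : List (String × List String)) (remaining : List String) (out : Option (List (String × String))) : Prop := out = pair_ingredient_with_allergen_alt per_allergen remaining
instance (per_allergen : List (String × List String)) (remaining : List String) (out : Option (List (String × String))) : Decidable (Spec_pair_ingredient_with_allergen per_allergen remaining out) := by unfold Spec_pair_ingredient_with_allergen; infer_instance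

-- ===== CLAIM (what is proved, stated in full; the proofs are below) =====
def Claim_equal_pair_ingredient_with_allergen : Prop := ∀ (per_allergen : List (String × List String)) (remaining : List String), Dom_pair_ingredient_with_allergen per_allergen remaining → Pre_pair_ingredient_with_allergen per_allergen remaining → Spec_pair_ingredient_with_allergen per_allergen remaining (pair_ingredient_with_allergen per_allergen remaining)

-- ===== LEMMAS AND PROOFS =====

-- A's search restricted to one frame: suffix pa' of per_allergen, explicit candidate list for the first level
def pvATry (pa' : List (String × List String)) (rem : List String) (cands : List String) : Option (List (String × String)) :=
  match pa' with
  | [] => if rem.isEmpty then some [] else none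
  | (fa, _) :: rest =>
    cands.foldr (fun x acc =>
      if PySem.Set.contains rem x then
        match pair_ingredient_with_allergen rest (PySem.Set.diff rem (PySem.Set.ofList [x])) with
        | some ps => some ((fa, x) :: ps)
        | none => acc
      else acc) none

def pvFrameVal (pa : List (String × List String)) (f : List String × List (String × String) × List String) : Option (List (String × String)) :=
  Option.map (f.2.1 ++ ·) (pvATry (pa.drop f.2.1.length) f.1 f.2.2)

def pvStackVal (pa : List (String × List String)) (stack : List (List String × List (String × String) × List String)) : Option (List (String × String)) :=
  stack.foldr (fun f o => Option.or (pvFrameVal pa f) o) none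

theorem pvATry_getD (pa : List (String × List String)) (j : Nat) (h : j < pa.length) (rem : List String) :
    pvATry (pa.drop j) rem ((pa.getD j ("", [])).2) = pair_ingredient_with_allergen (pa.drop j) rem := by
  obtain ⟨⟨fa, ings⟩, hg⟩ : ∃ g, pa.getD j ("", []) = g := ⟨_, rfl⟩
  have hdrop : pa.drop j = (fa, ings) :: pa.drop (j + 1) := by
    rw [← hg, List.getD_eq_getElem pa ("", []) h, List.getElem_cons_drop]
  rw [hg, hdrop]
  rfl

theorem pvLoop_eq (pa : List (String × List String)) :
    ∀ (m : Nat) (stack : List (List String × List (String × String) × List String)),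
      pvMeasure pa stack = m → (∀ f ∈ stack, f.2.1.length < pa.length) →
      pvLoop pa pa.length stack = pvStackVal pa stack := by
  intro m
  induction m using Nat.strong_induction_on with
  | _ m ih =>
  intro stack hm hwf
  match stack with
  | [] => simp [pvLoop, pvStackVal]
  | (rem, acc, cands) :: s =>
    have hwfs : ∀ f ∈ s, f.2.1.length < pa.length := fun f hf => hwf f (List.mem_cons_of_mem _ hf)
    have hacc : acc.length < pa.length := hwf (rem, acc, cands) List.mem_cons_self
    obtain ⟨⟨fa, ings⟩, hg⟩ : ∃ g, pa.getD acc.length ("", []) = g := ⟨_, rfl⟩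
    have hdrop : pa.drop acc.length = (fa, ings) :: pa.drop (acc.length + 1) := by
      rw [← hg, List.getD_eq_getElem pa ("", []) hacc, List.getElem_cons_drop]
    cases cands with
    | nil =>
      rw [pvLoop, ih _ (by rw [← hm]; exact pvMeasure_tail pa _ s) s rfl hwfs]
      simp [pvStackVal, pvFrameVal, hdrop, pvATry]
    | cons x cs =>
      rw [pvLoop, hg]
      dsimp only
      have hFf : pvFrameVal pa (rem, acc, x :: cs) =
          Option.map (acc ++ ·) (pvATry ((fa, ings) :: pa.drop (acc.length + 1)) rem (x :: cs)) := by
        simp only [pvFrameVal, hdrop]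
      have hFr : pvFrameVal pa (rem, acc, cs) =
          Option.map (acc ++ ·) (pvATry ((fa, ings) :: pa.drop (acc.length + 1)) rem cs) := by
        simp only [pvFrameVal, hdrop]
      by_cases hc : PySem.Set.contains rem x = true
      · rw [if_pos hc]
        have hATry : pvATry ((fa, ings) :: pa.drop (acc.length + 1)) rem (x :: cs) =
            (match pair_ingredient_with_allergen (pa.drop (acc.length + 1))
                     (PySem.Set.diff rem (PySem.Set.ofList [x])) with
             | some ps => some ((fa, x) :: ps)
             | none => pvATry ((fa, ings) :: pa.drop (acc.length + 1)) rem cs) := by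
          conv_lhs => rw [pvATry, List.foldr_cons]
          rw [if_pos hc]
          rfl
        by_cases hn1 : acc.length + 1 = pa.length
        · rw [if_pos hn1]
          have hrest : pa.drop (acc.length + 1) = [] := by rw [hn1, List.drop_length]
          have hbase : pair_ingredient_with_allergen (pa.drop (acc.length + 1))
              (PySem.Set.diff rem (PySem.Set.ofList [x])) =
              (if (PySem.Set.diff rem (PySem.Set.ofList [x])).isEmpty then some [] else none) := by
            rw [hrest, pair_ingredient_with_allergen]
          by_cases he : (PySem.Set.diff rem (PySem.Set.ofList [x])).isEmpty = true
          · rw [if_pos he]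
            rw [if_pos he] at hbase
            simp only [pvStackVal, List.foldr_cons, hFf, hATry, hbase]
            simp
          · rw [if_neg he]
            rw [if_neg he] at hbase
            rw [ih _ (by rw [← hm]; exact pvMeasure_advance pa rem acc x cs s) _ rfl
                (by intro f hf; rcases List.mem_cons.mp hf with h1 | hf
                    · subst h1; exact hacc
                    · exact hwfs f hf)]
            simp only [pvStackVal, List.foldr_cons, hFf, hFr, hATry, hbase]
        · rw [if_neg hn1]
          have hlt1 : acc.length + 1 < pa.length := lt_of_le_of_ne hacc hn1
          have hwf2 : ∀ f ∈ ((PySem.Set.diff rem (PySem.Set.ofList [x]), acc ++ [(fa, x)],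
              (pa.getD (acc.length + 1) ("", [])).2) :: (rem, acc, cs) :: s),
              f.2.1.length < pa.length := by
            intro f hf
            rcases List.mem_cons.mp hf with h1 | hf
            · subst h1; simpa using hlt1
            rcases List.mem_cons.mp hf with h1 | hf
            · subst h1; exact hacc
            · exact hwfs f hf
          rw [ih _ (by rw [← hm]; exact pvMeasure_push pa rem _ acc (fa, x) x cs s) _ rfl hwf2]
          have hFc : pvFrameVal pa (PySem.Set.diff rem (PySem.Set.ofList [x]), acc ++ [(fa, x)],
              (pa.getD (acc.length + 1) ("", [])).2) =
              Option.map ((acc ++ [(fa, x)]) ++ ·)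
                (pair_ingredient_with_allergen (pa.drop (acc.length + 1))
                  (PySem.Set.diff rem (PySem.Set.ofList [x]))) := by
            simp only [pvFrameVal]
            rw [List.length_append, List.length_cons, List.length_nil, Nat.zero_add,
              pvATry_getD pa (acc.length + 1) hlt1]
          simp only [pvStackVal, List.foldr_cons, hFf, hFr, hFc, hATry]
          cases hr : pair_ingredient_with_allergen (pa.drop (acc.length + 1))
              (PySem.Set.diff rem (PySem.Set.ofList [x])) with
          | some ps => simp
          | none => simp
      · rw [if_neg hc]
        rw [ih _ (by rw [← hm]; exact pvMeasure_advance pa rem acc x cs s) _ rfl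
            (by intro f hf; rcases List.mem_cons.mp hf with h1 | hf
                · subst h1; exact hacc
                · exact hwfs f hf)]
        have hskip : pvATry ((fa, ings) :: pa.drop (acc.length + 1)) rem (x :: cs) =
            pvATry ((fa, ings) :: pa.drop (acc.length + 1)) rem cs := by
          conv_lhs => rw [pvATry, List.foldr_cons]
          rw [if_neg hc]
          rfl
        simp only [pvStackVal, List.foldr_cons, hFf, hFr, hskip]

theorem pv_main (pa : List (String × List String)) (rem : List String) :
    pair_ingredient_with_allergen pa rem = pair_ingredient_with_allergen_alt pa rem := by
  cases pa with
  | nil => rfl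
  | cons hd tl =>
    have h0 : (0 : Nat) < (hd :: tl).length := by simp
    show pair_ingredient_with_allergen (hd :: tl) rem
        = pvLoop (hd :: tl) (hd :: tl).length [(rem, [], ((hd :: tl).getD 0 ("", [])).2)]
    rw [pvLoop_eq (hd :: tl) _ _ rfl (by intro f hf; simp at hf; subst hf; simp)]
    simp only [pvStackVal, List.foldr_cons, List.foldr_nil, pvFrameVal, Option.or_none,
      List.length_nil, List.drop_zero]
    obtain ⟨fa, ings⟩ := hd
    simp only [List.getD_cons_zero]
    have : pvATry ((fa, ings) :: tl) rem ings = pair_ingredient_with_allergen ((fa, ings) :: tl) rem := rfl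
    rw [this]
    simp

-- ===== VERDICT (by name: the statement is the Claim_ definition above) =====
theorem pair_ingredient_with_allergen_spec : Claim_equal_pair_ingredient_with_allergen := by
  intro pa rem _ _
  unfold Spec_pair_ingredient_with_allergen
  exact pv_main pa rem
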